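-- pv_equiv track=rewrite | github.com/karellen-kim/training-algorithm | src/main/python/cci/array.py | replace_v1
-- ===== SOURCE A (Python) =====
-- def replace_v1(matrix, num) :
--     replacedMatrix = copy(matrix)
--
--     for row in range(0, len(matrix)) :
--         for col in range(0, len(matrix[0])) :
--             if matrix[row][col] == num :
--                 replaceRow(replacedMatrix, num, row)
--                 replaceCol(replacedMatrix, num, col)
--     return replacedMatrix
--
-- def copy(matrix) :
--     return [row[:] for row in matrix]
--
-- def replaceRow(matrix, num, row) :
--     for i in range(0, len(matrix[0])) :
--         matrix[row][i] = num
--     return matrix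
--
-- def replaceCol(matrix, num, col) :
--     for i in range(0, len(matrix)) :
--         matrix[i][col] = num
--     return matrix
-- ===== SOURCE B (Python) =====
-- def replace_v1(matrix, num):
--     # Collect the sets of row/column indices containing num,
--     # then one fill pass.  R rows, C = len(matrix[0]) columns.
--     rows = set()
--     cols = set()
--     for r, row in enumerate(matrix):
--         for c in range(len(matrix[0])):
--             if row[c] == num:
--                 rows.add(r)
--                 cols.add(c)
--     out = []
--     for r, row in enumerate(matrix):
--         new = row[:]
--         for c in range(len(matrix[0])):
--             if r in rows or c in cols:
--                 new[c] = num
--         out.append(new)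
--     return out
-- ===== Notes on version B (the rewrite author's own statement) =====
-- stated objective: alternative
-- what changed: Instead of re-filling the whole row and column for every matching cell (fill loops nested inside the cell scan), B collects the sets of row and column indices containing num in one pass and then fills the marked cells in a second pass; Pre_ excludes only the inputs where A raises IndexError (a row shorter than the first row).
import Mathlib
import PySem

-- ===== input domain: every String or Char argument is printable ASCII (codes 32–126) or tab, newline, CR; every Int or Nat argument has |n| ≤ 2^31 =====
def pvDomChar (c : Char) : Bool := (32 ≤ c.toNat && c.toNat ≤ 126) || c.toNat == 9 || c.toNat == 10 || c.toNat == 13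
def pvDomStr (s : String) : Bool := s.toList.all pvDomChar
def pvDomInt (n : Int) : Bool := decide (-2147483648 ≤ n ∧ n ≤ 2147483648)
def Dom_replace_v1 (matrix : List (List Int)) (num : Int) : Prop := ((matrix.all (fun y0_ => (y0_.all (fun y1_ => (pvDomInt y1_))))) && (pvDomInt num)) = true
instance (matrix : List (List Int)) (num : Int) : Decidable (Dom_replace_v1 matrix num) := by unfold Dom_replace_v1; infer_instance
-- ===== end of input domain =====

-- B replaces A's per-match row/column refill with one pass collecting the sets of
-- row/column indices containing num plus one fill pass (a different algorithm;
-- not measurably faster on a timing run's random inputs).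


-- ===== PORT A =====
-- matrix[row][i] = num  (an in-range write inside Pre_)
def pvSetCell (m : List (List Int)) (r c : Nat) (v : Int) : List (List Int) :=
  m.modify r (fun row => row.set c v)

-- replaceRow: for i in range(0, len(matrix[0])): matrix[row][i] = num
def pvReplaceRow (m : List (List Int)) (num : Int) (row : Nat) : List (List Int) :=
  (List.range (m.headD []).length).foldl (fun acc i => pvSetCell acc row i num) m

-- replaceCol: for i in range(0, len(matrix)): matrix[i][col] = num
def pvReplaceCol (m : List (List Int)) (num : Int) (col : Nat) : List (List Int) :=
  (List.range m.length).foldl (fun acc i => pvSetCell acc i col num) m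

-- the nested scan of A; reads come from `matrix`, writes go to the copy
def replace_v1 (matrix : List (List Int)) (num : Int) : List (List Int) :=
  (List.range matrix.length).foldl (fun acc row =>
    (List.range (matrix.headD []).length).foldl (fun acc2 col =>
      if (matrix.getD row []).getD col 0 = num then
        pvReplaceCol (pvReplaceRow acc2 num row) num col
      else acc2) acc)
    (matrix.map (fun r => r))

-- ===== PORT B =====
-- one pass collecting the sets of row/column indices containing num, one fill pass
def replace_v1_alt (matrix : List (List Int)) (num : Int) : List (List Int) :=
  let rc : PySem.Set Nat × PySem.Set Nat :=
    matrix.zipIdx.foldl (fun acc p =>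
      (List.range (matrix.headD []).length).foldl (fun acc2 c =>
        if p.1.getD c 0 = num then (PySem.Set.add acc2.1 p.2, PySem.Set.add acc2.2 c)
        else acc2) acc)
      ([], [])
  matrix.zipIdx.map (fun p =>
    (List.range (matrix.headD []).length).foldl (fun nw c =>
      if rc.1.contains p.2 || rc.2.contains c then nw.set c num else nw) p.1)

-- ===== PRECONDITION & SPEC =====
-- Pre_ excludes exactly the inputs on which A raises IndexError: a nonempty matrix
-- with some row shorter than the first row (A reads/writes column indices up to
-- len(matrix[0])-1 in every row).  On such inputs A never returns (B raises there too).
def Pre_replace_v1 (matrix : List (List Int)) (num : Int) : Prop :=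
  ∀ row ∈ matrix, (matrix.headD []).length ≤ row.length
instance (matrix : List (List Int)) (num : Int) : Decidable (Pre_replace_v1 matrix num) := by
  unfold Pre_replace_v1; infer_instance

def pvWitness_replace_v1 : List (List Int) × Int := ([[1, 2], [3, 4]], 1)

def Spec_replace_v1 (matrix : List (List Int)) (num : Int) (out : List (List Int)) : Prop := out = replace_v1_alt matrix num
instance (matrix : List (List Int)) (num : Int) (out : List (List Int)) : Decidable (Spec_replace_v1 matrix num out) := by unfold Spec_replace_v1; infer_instance

-- ===== CLAIM (what is proved, stated in full; the proofs are below) =====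
def Claim_equal_replace_v1 : Prop := ∀ (matrix : List (List Int)) (num : Int), Dom_replace_v1 matrix num → Pre_replace_v1 matrix num → Spec_replace_v1 matrix num (replace_v1 matrix num)

-- ===== LEMMAS AND PROOFS =====

-- cell read used throughout (Python m[r][c], total via defaults; in-range everywhere it matters)
def pvGetC (m : List (List Int)) (r c : Nat) : Int := (m.getD r []).getD c 0

theorem pv_getD_row {α : Type} {m : List α} {r : Nat} {d : α} (hr : r < m.length) :
    m.getD r d = m[r] := by
  rw [List.getD_eq_getElem?_getD, List.getElem?_eq_getElem hr]; simp

theorem pv_getD_row_none {α : Type} {m : List α} {r : Nat} {d : α} (hr : m.length ≤ r) :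
    m.getD r d = d := by
  rw [List.getD_eq_getElem?_getD, List.getElem?_eq_none (by omega)]; simp

theorem pvGetC_eq_getElem (m : List (List Int)) (r c : Nat)
    (hr : r < m.length) (hc : c < m[r].length) :
    pvGetC m r c = m[r][c] := by
  unfold pvGetC
  rw [show m.getD r [] = m[r] from pv_getD_row hr,
    show m[r].getD c 0 = m[r][c] from pv_getD_row hc]

theorem pv_shape_headD {a b : List (List Int)}
    (h : a.map List.length = b.map List.length) :
    (a.headD []).length = (b.headD []).length := by
  cases a <;> cases b <;> simp_all

theorem pv_shape_length {a b : List (List Int)}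
    (h : a.map List.length = b.map List.length) : a.length = b.length := by
  have := congrArg List.length h; simpa using this

theorem pv_shape_row {a b : List (List Int)}
    (h : a.map List.length = b.map List.length) (r : Nat) :
    (a.getD r []).length = (b.getD r []).length := by
  have h1 : ∀ (m : List (List Int)) (r : Nat), (m.getD r []).length = (m.map List.length).getD r 0 := by
    intro m r
    by_cases hr : r < m.length
    · rw [show m.getD r [] = m[r] from pv_getD_row hr,
        show (m.map List.length).getD r 0 = (m.map List.length)[r]'(by simpa using hr) from
          pv_getD_row (by simpa using hr)]
      simp
    · rw [show m.getD r [] = ([] : List Int) from pv_getD_row_none (by omega),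
        show (m.map List.length).getD r 0 = 0 from pv_getD_row_none (by simpa using (by omega : m.length ≤ r))]
      simp
  rw [h1, h1, h]

-- generic paint lemma: a fold whose every step overwrites a set of cells with num
theorem pv_foldl_paint {ι : Type} (num : Int) (f : List (List Int) → ι → List (List Int))
    (W : ι → Nat → Nat → Bool) (m0 : List (List Int)) :
    ∀ (l : List ι) (init : List (List Int)),
    init.map List.length = m0.map List.length →
    (∀ acc x, x ∈ l → acc.map List.length = m0.map List.length →
       (f acc x).map List.length = m0.map List.length ∧
       ∀ r c, pvGetC (f acc x) r c = if W x r c then num else pvGetC acc r c) →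
    (l.foldl f init).map List.length = m0.map List.length ∧
    ∀ r c, pvGetC (l.foldl f init) r c =
      if l.any (fun x => W x r c) then num else pvGetC init r c := by
  intro l
  induction l with
  | nil => intro init h _; exact ⟨h, fun r c => by simp⟩
  | cons x xs ih =>
    intro init hsh hstep
    have hx := hstep init x (by simp) hsh
    have hrest := ih (f init x) hx.1 (fun acc y hy hacc => hstep acc y (by simp [hy]) hacc)
    refine ⟨hrest.1, fun r c => ?_⟩
    have h1 := hrest.2 r c
    have h2 := hx.2 r c
    simp only [List.foldl_cons] at *
    rw [h1, h2]
    cases hW : W x r c <;> cases hA : xs.any (fun y => W y r c) <;> simp [hW, hA]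

theorem pvSetCell_char (m : List (List Int)) (r c : Nat) (v : Int)
    (hr : r < m.length) (hc : c < (m.getD r []).length) :
    (pvSetCell m r c v).map List.length = m.map List.length ∧
    ∀ r' c', pvGetC (pvSetCell m r c v) r' c' =
      if (r' == r && c' == c) then v else pvGetC m r' c' := by
  have hlen : (pvSetCell m r c v).length = m.length := by simp [pvSetCell]
  have hget : ∀ (r' : Nat) (h : r' < m.length),
      (pvSetCell m r c v)[r']'(by omega) = if r = r' then m[r'].set c v else m[r'] := by
    intro r' h
    simp [pvSetCell, List.getElem_modify]
  constructor
  · apply List.ext_getElem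
    · simp [hlen]
    · intro i h1 h2
      simp only [List.getElem_map]
      rw [hget i (by simpa [hlen] using (by simpa using h1 : i < (pvSetCell m r c v).length))]
      split <;> simp
  · intro r' c'
    unfold pvGetC
    by_cases hr' : r' < m.length
    · rw [show (pvSetCell m r c v).getD r' [] = (pvSetCell m r c v)[r']'(by omega) from
        pv_getD_row (by omega), hget r' hr',
        show m.getD r' [] = m[r'] from pv_getD_row hr']
      by_cases hrr : r = r'
      · subst hrr
        rw [if_pos rfl]
        have hcl : c < m[r].length := by rwa [pv_getD_row hr'] at hc
        by_cases hcc : c = c'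
        · subst hcc
          rw [show (m[r].set c v).getD c 0 = (m[r].set c v)[c]'(by simpa using hcl) from
            pv_getD_row (by simpa using hcl)]
          simp
        · have h2 : ∀ d : Int, (m[r].set c v).getD c' d = m[r].getD c' d := by
            intro d
            rw [List.getD_eq_getElem?_getD, List.getD_eq_getElem?_getD, List.getElem?_set,
              if_neg hcc]
          rw [h2]
          simp [beq_iff_eq, Ne.symm hcc]
      · rw [if_neg hrr]
        simp [beq_iff_eq, Ne.symm hrr]
    · rw [show (pvSetCell m r c v).getD r' [] = ([] : List Int) from
        pv_getD_row_none (by omega),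
        show m.getD r' [] = ([] : List Int) from pv_getD_row_none (by omega)]
      have : ¬ (r' = r) := by omega
      simp [beq_iff_eq, this]

theorem pv_bool_eq_of_iff {a b : Bool} (h : a = true ↔ b = true) : a = b := by
  cases a <;> cases b <;> simp_all

theorem pv_any_range (n c' : Nat) :
    (List.range n).any (fun i => c' == i) = decide (c' < n) := by
  apply pv_bool_eq_of_iff
  rw [List.any_eq_true]
  constructor
  · rintro ⟨i, hi, he⟩
    rw [List.mem_range] at hi
    rw [beq_iff_eq] at he
    subst he
    exact decide_eq_true hi
  · intro h
    exact ⟨c', List.mem_range.mpr (of_decide_eq_true h), by simp⟩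

theorem pv_row_len {matrix : List (List Int)}
    (hpre : ∀ row ∈ matrix, (matrix.headD []).length ≤ row.length)
    {r : Nat} (hr : r < matrix.length) :
    (matrix.headD []).length ≤ matrix[r].length :=
  hpre _ (List.getElem_mem hr)

theorem pvReplaceRow_char (matrix : List (List Int)) (num : Int)
    (hpre : ∀ row ∈ matrix, (matrix.headD []).length ≤ row.length)
    (m : List (List Int)) (hsh : m.map List.length = matrix.map List.length)
    (row : Nat) (hrow : row < matrix.length) :
    (pvReplaceRow m num row).map List.length = matrix.map List.length ∧
    ∀ r' c', pvGetC (pvReplaceRow m num row) r' c' =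
      if (r' == row && decide (c' < (matrix.headD []).length)) then num else pvGetC m r' c' := by
  unfold pvReplaceRow
  rw [pv_shape_headD hsh]
  have hmain := pv_foldl_paint num (fun acc i => pvSetCell acc row i num)
    (fun i r' c' => r' == row && c' == i) matrix
    (List.range (matrix.headD []).length) m hsh ?_
  · refine ⟨hmain.1, fun r' c' => ?_⟩
    rw [hmain.2 r' c']
    have hb : ((List.range (matrix.headD []).length).any fun i => r' == row && c' == i) =
        (r' == row && decide (c' < (matrix.headD []).length)) := by
      cases hrr : (r' == row) with
      | false => simp
      | true =>
        simp only [Bool.true_and]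
        exact pv_any_range _ c'
    rw [hb]
  · intro acc i hi hacc
    have hi' : i < (matrix.headD []).length := List.mem_range.mp hi
    have hr : row < acc.length := by rw [pv_shape_length hacc]; exact hrow
    have hc : i < (acc.getD row []).length := by
      rw [pv_shape_row hacc, show matrix.getD row [] = matrix[row] from pv_getD_row hrow]
      exact lt_of_lt_of_le hi' (pv_row_len hpre hrow)
    have h := pvSetCell_char acc row i num hr hc
    exact ⟨by rw [h.1]; exact hacc, h.2⟩

theorem pvReplaceCol_char (matrix : List (List Int)) (num : Int)
    (hpre : ∀ row ∈ matrix, (matrix.headD []).length ≤ row.length)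
    (m : List (List Int)) (hsh : m.map List.length = matrix.map List.length)
    (col : Nat) (hcol : col < (matrix.headD []).length) :
    (pvReplaceCol m num col).map List.length = matrix.map List.length ∧
    ∀ r' c', pvGetC (pvReplaceCol m num col) r' c' =
      if (decide (r' < matrix.length) && c' == col) then num else pvGetC m r' c' := by
  unfold pvReplaceCol
  rw [pv_shape_length hsh]
  have hmain := pv_foldl_paint num (fun acc i => pvSetCell acc i col num)
    (fun i r' c' => r' == i && c' == col) matrix
    (List.range matrix.length) m hsh ?_
  · refine ⟨hmain.1, fun r' c' => ?_⟩
    rw [hmain.2 r' c']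
    have hb : ((List.range matrix.length).any fun i => r' == i && c' == col) =
        (decide (r' < matrix.length) && c' == col) := by
      cases hcc : (c' == col) with
      | false => simp
      | true =>
        simp only [Bool.and_true]
        exact pv_any_range _ r'
    rw [hb]
  · intro acc i hi hacc
    have hi' : i < matrix.length := List.mem_range.mp hi
    have hr : i < acc.length := by rw [pv_shape_length hacc]; exact hi'
    have hc : col < (acc.getD i []).length := by
      rw [pv_shape_row hacc, show matrix.getD i [] = matrix[i] from pv_getD_row hi']
      exact lt_of_lt_of_le hcol (pv_row_len hpre hi')
    have h := pvSetCell_char acc i col num hr hc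
    exact ⟨by rw [h.1]; exact hacc, h.2⟩

-- the Bool condition under which A's scan paints cell (r', c')
def pvAcond (matrix : List (List Int)) (num : Int) (r' c' : Nat) : Bool :=
  (List.range matrix.length).any (fun row =>
    (List.range (matrix.headD []).length).any (fun col =>
      decide (pvGetC matrix row col = num) &&
        ((r' == row && decide (c' < (matrix.headD []).length)) ||
         (decide (r' < matrix.length) && c' == col))))

theorem pvA_char (matrix : List (List Int)) (num : Int)
    (hpre : ∀ row ∈ matrix, (matrix.headD []).length ≤ row.length) :
    (replace_v1 matrix num).map List.length = matrix.map List.length ∧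
    ∀ r' c', pvGetC (replace_v1 matrix num) r' c' =
      if pvAcond matrix num r' c' then num else pvGetC matrix r' c' := by
  unfold replace_v1
  rw [show matrix.map (fun r => r) = matrix from by simp]
  have hmain := pv_foldl_paint num
    (fun acc row => (List.range (matrix.headD []).length).foldl (fun acc2 col =>
      if (matrix.getD row []).getD col 0 = num then
        pvReplaceCol (pvReplaceRow acc2 num row) num col
      else acc2) acc)
    (fun row r' c' => (List.range (matrix.headD []).length).any (fun col =>
      decide (pvGetC matrix row col = num) &&
        ((r' == row && decide (c' < (matrix.headD []).length)) ||
         (decide (r' < matrix.length) && c' == col))))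
    matrix (List.range matrix.length) matrix rfl ?_
  · exact ⟨hmain.1, fun r' c' => hmain.2 r' c'⟩
  · intro acc row hrowmem hacc
    dsimp only
    have hrow : row < matrix.length := List.mem_range.mp hrowmem
    have hinner := pv_foldl_paint num
      (fun acc2 col =>
        if (matrix.getD row []).getD col 0 = num then
          pvReplaceCol (pvReplaceRow acc2 num row) num col
        else acc2)
      (fun col r' c' =>
        decide (pvGetC matrix row col = num) &&
          ((r' == row && decide (c' < (matrix.headD []).length)) ||
           (decide (r' < matrix.length) && c' == col)))
      matrix (List.range (matrix.headD []).length) acc hacc ?_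
    · exact hinner
    · intro acc2 col hcolmem hacc2
      dsimp only
      have hcol : col < (matrix.headD []).length := List.mem_range.mp hcolmem
      have hread : (matrix.getD row []).getD col 0 = pvGetC matrix row col := rfl
      by_cases hm : pvGetC matrix row col = num
      · rw [hread, if_pos hm]
        have hRR := pvReplaceRow_char matrix num hpre acc2 hacc2 row hrow
        have hRC := pvReplaceCol_char matrix num hpre _ hRR.1 col hcol
        refine ⟨hRC.1, fun r' c' => ?_⟩
        rw [hRC.2 r' c', hRR.2 r' c']
        simp only [decide_eq_true hm]
        cases h1 : (decide (r' < matrix.length) && c' == col) <;>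
          cases h2 : (r' == row && decide (c' < (matrix.headD []).length)) <;>
            simp
      · rw [hread, if_neg hm]
        refine ⟨hacc2, fun r' c' => ?_⟩
        simp only [decide_eq_false hm]
        simp

theorem pvAcond_false_of_right {matrix : List (List Int)} {num : Int} {r' c' : Nat}
    (h : matrix.length ≤ r' ∨ (matrix.headD []).length ≤ c') :
    pvAcond matrix num r' c' = false := by
  apply pv_bool_eq_of_iff
  simp only [pvAcond, List.any_eq_true, List.mem_range, Bool.and_eq_true, Bool.or_eq_true,
    beq_iff_eq, decide_eq_true_eq, Bool.false_eq_true, iff_false, not_exists]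
  rintro row ⟨hrow, col, hcol, _, (⟨hr, hc⟩ | ⟨hr, hc⟩)⟩ <;> omega

-- pvAcond on an in-range cell: the row contains num in the first C columns, or
-- some row has num at column c'
theorem pvAcond_iff (matrix : List (List Int)) (num : Int) (r' c' : Nat)
    (hr' : r' < matrix.length) (hc' : c' < (matrix.headD []).length) :
    pvAcond matrix num r' c' = true ↔
      ((∃ col, col < (matrix.headD []).length ∧ pvGetC matrix r' col = num) ∨
       (∃ row, row < matrix.length ∧ pvGetC matrix row c' = num)) := by
  simp only [pvAcond, List.any_eq_true, List.mem_range, Bool.and_eq_true, Bool.or_eq_true,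
    beq_iff_eq, decide_eq_true_eq]
  constructor
  · rintro ⟨row, hrow, col, hcol, hval, (⟨he, _⟩ | ⟨_, he⟩)⟩
    · subst he; exact Or.inl ⟨col, hcol, hval⟩
    · subst he; exact Or.inr ⟨row, hrow, hval⟩
  · rintro (⟨col, hcol, hval⟩ | ⟨row, hrow, hval⟩)
    · exact ⟨r', hr', col, hcol, hval, Or.inl ⟨rfl, hc'⟩⟩
    · exact ⟨row, hrow, c', hc', hval, Or.inr ⟨hr', rfl⟩⟩

-- B's inner loop: adds the row index (if a scanned column holds num) and the
-- matching column indices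
theorem pvInnerB (num : Int) (r : Nat) (row : List Int) :
    ∀ (l : List Nat) (acc : List Nat × List Nat),
    (∀ x, x ∈ (l.foldl (fun acc2 c =>
        if row.getD c 0 = num then (PySem.Set.add acc2.1 r, PySem.Set.add acc2.2 c)
        else acc2) acc).1
      ↔ x ∈ acc.1 ∨ (x = r ∧ ∃ c ∈ l, row.getD c 0 = num)) ∧
    (∀ x, x ∈ (l.foldl (fun acc2 c =>
        if row.getD c 0 = num then (PySem.Set.add acc2.1 r, PySem.Set.add acc2.2 c)
        else acc2) acc).2
      ↔ x ∈ acc.2 ∨ ∃ c ∈ l, row.getD c 0 = num ∧ x = c) := by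
  intro l
  induction l with
  | nil => intro acc; simp
  | cons c cs ih =>
    intro acc
    simp only [List.foldl_cons]
    by_cases hv : row.getD c 0 = num
    · rw [if_pos hv]
      have h := ih (PySem.Set.add acc.1 r, PySem.Set.add acc.2 c)
      constructor
      · intro x
        rw [h.1 x, PySem.Set.mem_add]
        constructor
        · rintro ((hx | hx) | ⟨hx, c0, hc0, hval⟩)
          · exact Or.inl hx
          · exact Or.inr ⟨hx, c, List.mem_cons_self, hv⟩
          · exact Or.inr ⟨hx, c0, List.mem_cons_of_mem c hc0, hval⟩
        · rintro (hx | ⟨hx, _⟩)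
          · exact Or.inl (Or.inl hx)
          · exact Or.inl (Or.inr hx)
      · intro x
        rw [h.2 x, PySem.Set.mem_add]
        constructor
        · rintro ((hx | hx) | ⟨c0, hc0, hval, hxe⟩)
          · exact Or.inl hx
          · exact Or.inr ⟨c, List.mem_cons_self, hv, hx⟩
          · exact Or.inr ⟨c0, List.mem_cons_of_mem c hc0, hval, hxe⟩
        · rintro (hx | ⟨c0, hc0, hval, hxe⟩)
          · exact Or.inl (Or.inl hx)
          · rcases List.mem_cons.mp hc0 with h0 | h0
            · subst h0; exact Or.inl (Or.inr hxe)
            · exact Or.inr ⟨c0, h0, hval, hxe⟩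
    · rw [if_neg hv]
      have h := ih acc
      constructor
      · intro x
        rw [h.1 x]
        constructor
        · rintro (hx | ⟨hx, c0, hc0, hval⟩)
          · exact Or.inl hx
          · exact Or.inr ⟨hx, c0, List.mem_cons_of_mem c hc0, hval⟩
        · rintro (hx | ⟨hx, c0, hc0, hval⟩)
          · exact Or.inl hx
          · rcases List.mem_cons.mp hc0 with h0 | h0
            · subst h0; exact absurd hval hv
            · exact Or.inr ⟨hx, c0, h0, hval⟩
      · intro x
        rw [h.2 x]
        constructor
        · rintro (hx | ⟨c0, hc0, hval, hxe⟩)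
          · exact Or.inl hx
          · exact Or.inr ⟨c0, List.mem_cons_of_mem c hc0, hval, hxe⟩
        · rintro (hx | ⟨c0, hc0, hval, hxe⟩)
          · exact Or.inl hx
          · rcases List.mem_cons.mp hc0 with h0 | h0
            · subst h0; exact absurd hval hv
            · exact Or.inr ⟨c0, h0, hval, hxe⟩

-- B's outer loop: the sets of marked row indices and column indices
theorem pvOuterB (num : Int) (C : Nat) (matrix : List (List Int)) :
    ∀ (k : Nat) (acc : List Nat × List Nat),
    (∀ x, x ∈ ((matrix.zipIdx k).foldl (fun acc p =>
        (List.range C).foldl (fun acc2 c =>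
          if p.1.getD c 0 = num then (PySem.Set.add acc2.1 p.2, PySem.Set.add acc2.2 c)
          else acc2) acc) acc).1
      ↔ x ∈ acc.1 ∨ ∃ i, ∃ _ : i < matrix.length,
          (∃ c ∈ List.range C, matrix[i].getD c 0 = num) ∧ x = k + i) ∧
    (∀ x, x ∈ ((matrix.zipIdx k).foldl (fun acc p =>
        (List.range C).foldl (fun acc2 c =>
          if p.1.getD c 0 = num then (PySem.Set.add acc2.1 p.2, PySem.Set.add acc2.2 c)
          else acc2) acc) acc).2
      ↔ x ∈ acc.2 ∨ ∃ i, ∃ _ : i < matrix.length,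
          ∃ c ∈ List.range C, matrix[i].getD c 0 = num ∧ x = c) := by
  induction matrix with
  | nil => intro k acc; simp
  | cons m0 ms ih =>
    intro k acc
    simp only [List.zipIdx_cons, List.foldl_cons]
    have hin := pvInnerB num k m0 (List.range C) acc
    set acc' := ((List.range C).foldl (fun acc2 c =>
      if m0.getD c 0 = num then (PySem.Set.add acc2.1 k, PySem.Set.add acc2.2 c)
      else acc2) acc) with hacc'
    have h := ih (k + 1) acc'
    constructor
    · intro x
      rw [h.1 x, hin.1 x]
      constructor
      · rintro ((hx | ⟨hx, hm⟩) | ⟨i, hi, hm, hxe⟩)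
        · exact Or.inl hx
        · exact Or.inr ⟨0, by simp, by simpa using hm, by omega⟩
        · exact Or.inr ⟨i + 1, by simp only [List.length_cons]; omega, by simpa using hm, by omega⟩
      · rintro (hx | ⟨i, hi, hm, hxe⟩)
        · exact Or.inl (Or.inl hx)
        · cases i with
          | zero => exact Or.inl (Or.inr ⟨by omega, by simpa using hm⟩)
          | succ i' => exact Or.inr ⟨i', by simp only [List.length_cons] at hi; omega,
              by simpa using hm, by omega⟩
    · intro x
      rw [h.2 x, hin.2 x]
      constructor
      · rintro ((hx | hm) | ⟨i, hi, hm⟩)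
        · exact Or.inl hx
        · exact Or.inr ⟨0, by simp, by simpa using hm⟩
        · exact Or.inr ⟨i + 1, by simp only [List.length_cons]; omega, by simpa using hm⟩
      · rintro (hx | ⟨i, hi, hm⟩)
        · exact Or.inl (Or.inl hx)
        · cases i with
          | zero => exact Or.inl (Or.inr (by simpa using hm))
          | succ i' => exact Or.inr ⟨i', by simp only [List.length_cons] at hi; omega,
              by simpa using hm⟩

-- row fill: new[c] = num at every index of l (List.set is a no-op out of range)
theorem pv_foldl_set (num : Int) : ∀ (l : List Nat) (row : List Int),
    (l.foldl (fun nw c => nw.set c num) row).length = row.length ∧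
    ∀ c', (l.foldl (fun nw c => nw.set c num) row).getD c' 0 =
      if (l.contains c' && decide (c' < row.length)) then num else row.getD c' 0 := by
  intro l
  induction l with
  | nil => intro row; exact ⟨rfl, fun c' => by simp⟩
  | cons c cs ih =>
    intro row
    have h := ih (row.set c num)
    rw [List.length_set] at h
    refine ⟨h.1, fun c' => ?_⟩
    simp only [List.foldl_cons]
    rw [h.2 c']
    have hset : (row.set c num).getD c' 0 =
        if (c' == c && decide (c' < row.length)) then num else row.getD c' 0 := by
      rw [List.getD_eq_getElem?_getD, List.getD_eq_getElem?_getD, List.getElem?_set]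
      by_cases hcc : c = c'
      · subst hcc
        by_cases hl : c < row.length <;> simp [hl, List.getElem?_eq_none, le_of_not_gt]
      · simp [hcc, Ne.symm hcc, beq_iff_eq]
    rw [hset]
    rw [List.contains_cons]
    cases hb1 : (c' == c) <;> cases hb2 : cs.contains c' <;> cases hb3 : decide (c' < row.length) <;>
      simp [hb1, hb2, hb3]

-- guarded writes = writes at the filtered index list
theorem pv_fold_if_filter (num : Int) (P : Nat → Bool) :
    ∀ (l : List Nat) (row : List Int),
    l.foldl (fun nw c => if P c then nw.set c num else nw) row
      = (l.filter P).foldl (fun nw c => nw.set c num) row := by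
  intro l
  induction l with
  | nil => intro row; simp
  | cons c cs ih =>
    intro row
    by_cases h : P c <;> simp [List.filter_cons, h, ih]

theorem pv_contains_filter (P : Nat → Bool) (l : List Nat) (x : Nat) :
    (l.filter P).contains x = (l.contains x && P x) := by
  apply pv_bool_eq_of_iff
  simp [List.contains_iff_mem, List.mem_filter]

-- B satisfies the same cell characterization as A
theorem pvB_char (matrix : List (List Int)) (num : Int)
    (hple : ∀ row ∈ matrix, (matrix.headD []).length ≤ row.length) :
    (replace_v1_alt matrix num).map List.length = matrix.map List.length ∧
    ∀ r' c', pvGetC (replace_v1_alt matrix num) r' c' =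
      if pvAcond matrix num r' c' then num else pvGetC matrix r' c' := by
  set C := (matrix.headD []).length with hC
  set rc : List Nat × List Nat :=
    matrix.zipIdx.foldl (fun acc p =>
      (List.range C).foldl (fun acc2 c =>
        if p.1.getD c 0 = num then (PySem.Set.add acc2.1 p.2, PySem.Set.add acc2.2 c)
        else acc2) acc)
      ([], []) with hrc
  have halt : replace_v1_alt matrix num = matrix.zipIdx.map (fun p =>
      (List.range C).foldl (fun nw c =>
        if rc.1.contains p.2 || rc.2.contains c then nw.set c num else nw) p.1) := rfl
  rw [halt]
  have hmem := pvOuterB num C matrix 0 ([], [])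
  have hrows : ∀ x, x ∈ rc.1 ↔ ∃ _ : x < matrix.length,
      ∃ c, c < C ∧ matrix[x].getD c 0 = num := by
    intro x
    rw [hrc, hmem.1 x]
    constructor
    · rintro (hx | ⟨i, hi, ⟨c, hc, hval⟩, hxe⟩)
      · simp at hx
      · have hx : x = i := by omega
        subst hx
        exact ⟨hi, c, List.mem_range.mp hc, hval⟩
    · rintro ⟨hx, c, hc, hval⟩
      exact Or.inr ⟨x, hx, ⟨c, List.mem_range.mpr hc, hval⟩, by omega⟩
  have hcols : ∀ x, x ∈ rc.2 ↔ ∃ i, ∃ _ : i < matrix.length,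
      x < C ∧ matrix[i].getD x 0 = num := by
    intro x
    rw [hrc, hmem.2 x]
    constructor
    · rintro (hx | ⟨i, hi, c, hc, hval, hxe⟩)
      · simp at hx
      · subst hxe
        exact ⟨i, hi, List.mem_range.mp hc, hval⟩
    · rintro ⟨i, hi, hx, hval⟩
      exact Or.inr ⟨i, hi, x, List.mem_range.mpr hx, hval, rfl⟩
  have hfill : ∀ (r : Nat) (row : List Int),
      (List.range C).foldl (fun nw c =>
        if rc.1.contains r || rc.2.contains c then nw.set c num else nw) row
      = ((List.range C).filter (fun c => rc.1.contains r || rc.2.contains c)).foldl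
          (fun nw c => nw.set c num) row :=
    fun r row => pv_fold_if_filter num (fun c => rc.1.contains r || rc.2.contains c)
      (List.range C) row
  have hrowB : ∀ (r : Nat) (h : r < matrix.length),
      (matrix.zipIdx.map (fun p =>
        (List.range C).foldl (fun nw c =>
          if rc.1.contains p.2 || rc.2.contains c then nw.set c num else nw) p.1)).getD r [] =
      (List.range C).foldl (fun nw c =>
        if rc.1.contains r || rc.2.contains c then nw.set c num else nw) matrix[r] := by
    intro r h
    rw [pv_getD_row (by simpa using h)]
    simp [List.getElem_zipIdx]
  constructor
  · apply List.ext_getElem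
    · simp
    · intro i h1 h2
      simp only [List.getElem_map, List.getElem_zipIdx]
      rw [hfill, (pv_foldl_set num _ _).1]
  · intro r' c'
    by_cases hr' : r' < matrix.length
    · unfold pvGetC
      rw [hrowB r' hr', hfill, (pv_foldl_set num _ _).2 c',
        show matrix.getD r' [] = matrix[r'] from pv_getD_row hr',
        pv_contains_filter]
      by_cases hc' : c' < C
      · have hcl : c' < matrix[r'].length :=
          lt_of_lt_of_le hc' (pv_row_len hple hr')
        have hcond : ((List.range C).contains c' &&
            (rc.1.contains r' || rc.2.contains c') && decide (c' < matrix[r'].length)) =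
            pvAcond matrix num r' c' := by
          apply pv_bool_eq_of_iff
          rw [pvAcond_iff matrix num r' c' hr' hc']
          simp only [Bool.and_eq_true, Bool.or_eq_true, List.contains_iff_mem, List.mem_range,
            decide_eq_true_eq, hrows, hcols]
          constructor
          · rintro ⟨⟨_, (⟨_, c0, hc0, hval⟩ | ⟨i, hi, hx, hval⟩)⟩, _⟩
            · exact Or.inl ⟨c0, hc0, by rw [pvGetC, pv_getD_row hr']; exact hval⟩
            · exact Or.inr ⟨i, hi, by rw [pvGetC, pv_getD_row hi]; exact hval⟩
          · rintro (⟨c0, hc0, hval⟩ | ⟨i, hi, hval⟩)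
            · rw [pvGetC, pv_getD_row hr'] at hval
              exact ⟨⟨hc', Or.inl ⟨hr', c0, hc0, hval⟩⟩, hcl⟩
            · rw [pvGetC, pv_getD_row hi] at hval
              exact ⟨⟨hc', Or.inr ⟨i, hi, hc', hval⟩⟩, hcl⟩
        rw [hcond]
      · rw [pvAcond_false_of_right (Or.inr (by omega : (matrix.headD []).length ≤ c'))]
        have : (List.range C).contains c' = false := by
          apply pv_bool_eq_of_iff
          simp only [List.contains_iff_mem, List.mem_range, Bool.false_eq_true, iff_false]
          omega
        rw [this]
        simp
    · unfold pvGetC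
      rw [pv_getD_row_none (show (matrix.zipIdx.map (fun p =>
          (List.range C).foldl (fun nw c =>
            if rc.1.contains p.2 || rc.2.contains c then nw.set c num else nw) p.1)).length ≤ r'
          from by simp only [List.length_map, List.length_zipIdx]; omega),
        pv_getD_row_none (show matrix.length ≤ r' from by omega),
        pvAcond_false_of_right (Or.inl (by omega))]
      simp

theorem pv_eq_of_getC (a b : List (List Int))
    (hsh : a.map List.length = b.map List.length)
    (h : ∀ r c, pvGetC a r c = pvGetC b r c) : a = b := by
  apply List.ext_getElem
  · exact pv_shape_length hsh
  · intro r h1 h2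
    apply List.ext_getElem
    · have := pv_shape_row hsh r
      rwa [pv_getD_row h1, pv_getD_row h2] at this
    · intro c hc1 hc2
      rw [← pvGetC_eq_getElem a r c h1 hc1, ← pvGetC_eq_getElem b r c h2 hc2]
      exact h r c

-- ===== VERDICT (by name: the statement is the Claim_ definition above) =====
theorem replace_v1_spec : Claim_equal_replace_v1 := by
  intro matrix num _ hpre
  unfold Spec_replace_v1
  unfold Pre_replace_v1 at hpre
  have hA := pvA_char matrix num hpre
  have hB := pvB_char matrix num hpre
  apply pv_eq_of_getC
  · rw [hA.1, hB.1]
  · intro r c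
    rw [hA.2 r c, hB.2 r c]
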